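-- pv_equiv track=rewrite | github.com/scalarco/adventofcode | 2021/Day12/cavepath.py | checkhas2
-- ===== SOURCE A (Python) =====
-- def checkhas2(path):
--     curr_dict = {}
--     for a in path:
--         if not a.isupper():
--             if a in curr_dict:
--                 curr_dict[a] = curr_dict[a] + 1
--             else:
--                 curr_dict[a] = 1
--     count2 = 0
--     for d in curr_dict.values():
--         if d >= 2:
--             count2 = count2 + 1
--     return (count2 >= 2)
-- ===== SOURCE B (Python) =====
-- def checkhas2(path):
--     smalls = sorted(a for a in path if not a.isupper())
--     runs = 0
--     prev = None
--     in_run = False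
--     for a in smalls:
--         if a == prev and not in_run:
--             runs = runs + 1
--             in_run = True
--         elif a != prev:
--             prev = a
--             in_run = False
--     return runs >= 2
-- ===== Notes on version B (the rewrite author's own statement) =====
-- stated objective: alternative
-- what changed: Replaces A's frequency-dict-then-scan-values with sort-then-scan: sort the small caves and count maximal runs of length >= 2 in one linear sweep over the sorted list.
import Mathlib
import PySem

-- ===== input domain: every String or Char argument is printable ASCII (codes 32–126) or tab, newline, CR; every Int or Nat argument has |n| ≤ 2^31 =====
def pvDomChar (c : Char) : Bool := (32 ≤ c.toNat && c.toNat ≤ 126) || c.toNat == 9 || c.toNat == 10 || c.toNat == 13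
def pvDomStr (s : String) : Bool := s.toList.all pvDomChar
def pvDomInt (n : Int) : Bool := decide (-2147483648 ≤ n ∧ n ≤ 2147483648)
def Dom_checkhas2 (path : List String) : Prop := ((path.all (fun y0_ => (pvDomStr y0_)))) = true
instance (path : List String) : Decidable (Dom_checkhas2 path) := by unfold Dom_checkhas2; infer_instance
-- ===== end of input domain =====

-- B replaces A's frequency-dict-then-scan-values with sort-then-scan: sort the small caves,
-- then count maximal runs of length >= 2 in one sweep over the sorted list; objective: alternative.

-- hand port of Python str.isupper(), exact on the printable-ASCII domain (where the cased
-- characters are exactly the letters): some uppercase letter and no lowercase letter.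
def pyStrIsupper (s : String) : Bool :=
  s.toList.any PySem.Chars.isupper && s.toList.all (fun c => !PySem.Chars.islower c)

-- ===== PORT A =====
def checkhas2 (path : List String) : Bool :=
  let currDict := path.foldl (fun d a =>
    if !pyStrIsupper a then
      if d.contains a then d.insert a (d.getD a 0 + 1) else d.insert a 1
    else d) (PySem.Dict.empty : PySem.Dict String Int)
  let count2 := currDict.values.foldl (fun c dv => if 2 ≤ dv then c + 1 else c) (0 : Int)
  decide (2 ≤ count2)

-- ===== PORT B =====
def checkhas2_alt (path : List String) : Bool :=
  let smalls := PySem.List.sorted (path.filter (fun a => !pyStrIsupper a)) (fun x => x) false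
  let st := smalls.foldl (fun (st : Int × Option String × Bool) a =>
    if st.2.1 = some a ∧ st.2.2 = false then (st.1 + 1, st.2.1, true)
    else if st.2.1 ≠ some a then (st.1, some a, false)
    else st) ((0 : Int), (none : Option String), false)
  decide (2 ≤ st.1)

-- ===== PRECONDITION & SPEC =====
def Spec_checkhas2 (path : List String) (out : Bool) : Prop := out = checkhas2_alt path
instance (path : List String) (out : Bool) : Decidable (Spec_checkhas2 path out) := by unfold Spec_checkhas2; infer_instance

-- ===== CLAIM (what is proved, stated in full; the proofs are below) =====
def Claim_equal_checkhas2 : Prop := ∀ (path : List String), Dom_checkhas2 path → Spec_checkhas2 path (checkhas2 path)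

-- ===== LEMMAS AND PROOFS =====

-- proof-side name for B's loop body
def stepB (st : Int × Option String × Bool) (a : String) : Int × Option String × Bool :=
  if st.2.1 = some a ∧ st.2.2 = false then (st.1 + 1, st.2.1, true)
  else if st.2.1 ≠ some a then (st.1, some a, false)
  else st

-- the quantity both programs compute: number of distinct elements occurring ≥ 2 times
def F (l : List String) : Nat := (l.toFinset.filter (fun a => 2 ≤ l.count a)).card

-- A's dict after the first loop is Counter(smalls)
lemma dictA_eq_counter (xs : List String) :
    xs.foldl (fun d a => if d.contains a then d.insert a (d.getD a 0 + 1) else d.insert a 1)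
      (PySem.Dict.empty : PySem.Dict String Int)
    = PySem.Dict.counter xs := by
  rw [PySem.List.foldl_congr_mem _ _ (fun d a => d.insert a (d.getD a 0 + 1)) _ ?_,
      PySem.Dict.foldl_insert_getD_add_one_eq_counter]
  intro d a _
  by_cases hc : d.contains a = true
  · simp [hc]
  · have hcf : d.contains a = false := by simpa using hc
    simp [hcf, PySem.Dict.getD_of_not_contains _ _ hcf]

-- A's countP over the distinct elements equals F
lemma countP_ofList_eq_F (xs : List String) :
    (PySem.Set.ofList xs).countP (fun a => decide (2 ≤ xs.count a)) = F xs := by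
  rw [List.countP_eq_length_filter, F]
  rw [← List.toFinset_card_of_nodup ((PySem.Set.nodup_ofList xs).filter _)]
  congr 1
  ext a
  simp only [List.mem_toFinset, List.mem_filter, Finset.mem_filter, PySem.Set.mem_ofList,
    decide_eq_true_eq]

-- F-bookkeeping on appending one element
lemma F_append_not_mem (ys : List String) (x : String) (hx : x ∉ ys) :
    F (ys ++ [x]) = F ys := by
  unfold F
  have ht : (ys ++ [x]).toFinset = insert x ys.toFinset := by
    simp [List.toFinset_append]
  rw [ht, Finset.filter_insert]
  have hcx : (ys ++ [x]).count x = 1 := by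
    simp [List.count_append, List.count_eq_zero.mpr hx]
  rw [if_neg (by omega)]
  congr 1
  apply Finset.filter_congr
  intro a ha
  have hax : x ≠ a := fun h => hx (h ▸ List.mem_toFinset.mp ha)
  simp [List.count_append, List.count_singleton, if_neg hax]

lemma F_append_ge2 (ys : List String) (x : String) (hx : x ∈ ys) (h2 : 2 ≤ ys.count x) :
    F (ys ++ [x]) = F ys := by
  unfold F
  have ht : (ys ++ [x]).toFinset = ys.toFinset := by
    simp [List.toFinset_append, Finset.insert_eq_self.mpr (List.mem_toFinset.mpr hx)]
  rw [ht]
  congr 1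
  apply Finset.filter_congr
  intro a _
  by_cases hax : a = x
  · subst hax
    simp only [List.count_append, List.count_singleton]
    constructor <;> intro <;> omega
  · simp [List.count_append, List.count_singleton, if_neg (fun h => hax (Eq.symm h))]

lemma F_append_one (ys : List String) (x : String) (h1 : ys.count x = 1) :
    F (ys ++ [x]) = F ys + 1 := by
  unfold F
  have hx : x ∈ ys := List.count_pos_iff.mp (by omega)
  have ht : (ys ++ [x]).toFinset = ys.toFinset := by
    simp [List.toFinset_append, Finset.insert_eq_self.mpr (List.mem_toFinset.mpr hx)]
  rw [ht]
  have hset : ys.toFinset.filter (fun a => 2 ≤ (ys ++ [x]).count a)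
      = insert x (ys.toFinset.filter (fun a => 2 ≤ ys.count a)) := by
    ext a
    by_cases hax : a = x
    · subst hax
      simp [List.mem_toFinset.mpr hx, List.count_append, h1]
    · simp [Finset.mem_filter, Finset.mem_insert, hax, List.count_append,
        List.count_singleton, if_neg (fun h => hax (Eq.symm h))]
  rw [hset, Finset.card_insert_of_notMem (by simp [Finset.mem_filter, h1])]

-- in a ≤-sorted list every element is at most the last one
lemma mem_le_getLast {l : List String} (h : l.Pairwise (· ≤ ·)) {z : String}
    (hz : l.getLast? = some z) : ∀ a ∈ l, a ≤ z := by
  induction l using List.reverseRecOn with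
  | nil => simp at hz
  | append_singleton ys x _ =>
    rw [List.pairwise_append] at h
    simp only [List.getLast?_append, List.getLast?_singleton] at hz
    injection hz with hz
    subst hz
    intro a ha
    rcases List.mem_append.mp ha with h1 | h1
    · exact h.2.2 a h1 x (List.mem_singleton.mpr rfl)
    · exact le_of_eq (List.mem_singleton.mp h1)

-- F is invariant under permutation
lemma F_perm {l1 l2 : List String} (h : l1.Perm l2) : F l1 = F l2 := by
  unfold F
  rw [List.toFinset_eq_of_perm _ _ h]
  congr 1
  apply Finset.filter_congr
  intro a _
  simp [h.count_eq]

-- B's fold invariant over a sorted list: runs = F, prev = last element, in_run ↔ last occurs ≥ 2 times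
lemma foldB_inv (ys : List String) (hs : ys.Pairwise (· ≤ ·)) :
    (ys.foldl stepB (0, none, false)).1 = (F ys : Int)
    ∧ (ys.foldl stepB (0, none, false)).2.1 = ys.getLast?
    ∧ ((ys.foldl stepB (0, none, false)).2.2 = true
        ↔ ∃ z, ys.getLast? = some z ∧ 2 ≤ ys.count z) := by
  induction ys using List.reverseRecOn with
  | nil => simp [F]
  | append_singleton ys x ih =>
    rw [List.pairwise_append] at hs
    obtain ⟨hys, -, hle⟩ := hs
    obtain ⟨ih1, ih2, ih3⟩ := ih hys
    rw [List.foldl_append]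
    simp only [List.foldl_cons, List.foldl_nil]
    set st := ys.foldl stepB (0, none, false) with hst
    have hlast : (ys ++ [x]).getLast? = some x := by simp
    by_cases hpx : st.2.1 = some x
    · -- x equals the last element of ys, so x ∈ ys
      have hlx : ys.getLast? = some x := ih2 ▸ hpx
      have hxy : x ∈ ys := List.mem_of_getLast? hlx
      have hc1 : 1 ≤ ys.count x := List.count_pos_iff.mpr hxy
      have hcx : (ys ++ [x]).count x = ys.count x + 1 := by simp [List.count_append]
      by_cases hr : st.2.2 = true
      · -- already inside a run: state unchanged
        have h2 : 2 ≤ ys.count x := by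
          obtain ⟨z, hz, hz2⟩ := ih3.mp hr
          rw [hlx] at hz; injection hz with hz; exact hz ▸ hz2
        unfold stepB
        rw [if_neg (by simp [hr]), if_neg (by simp [hpx])]
        refine ⟨by rw [ih1, F_append_ge2 ys x hxy h2], by rw [ih2, hlast, hlx], ?_⟩
        simp only [hr, hlast, true_iff]
        exact ⟨x, rfl, by omega⟩
      · -- first duplicate of this run: runs + 1
        have hrf : st.2.2 = false := by simpa using hr
        have h1 : ys.count x = 1 := by
          by_contra h
          exact hr (ih3.mpr ⟨x, hlx, by omega⟩)
        unfold stepB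
        rw [if_pos ⟨hpx, hrf⟩]
        refine ⟨?_, by simp [hpx, hlast], ?_⟩
        · simp only [ih1, F_append_one ys x h1]; push_cast; ring
        · simp only [hlast, true_iff]
          exact ⟨x, rfl, by omega⟩
    · -- x is a new element: since ys is sorted and every y ∈ ys is ≤ x, x ∉ ys
      have hnx : x ∉ ys := by
        intro hxy
        cases hlz : ys.getLast? with
        | none => exact List.ne_nil_of_mem hxy (List.getLast?_eq_none_iff.mp hlz)
        | some z =>
          have hzx : z ≤ x := hle z (List.mem_of_getLast? hlz) x (List.mem_singleton.mpr rfl)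
          have hxz : x ≤ z := mem_le_getLast hys hlz x hxy
          exact hpx (ih2 ▸ (le_antisymm hzx hxz ▸ hlz))
      have hcx : (ys ++ [x]).count x = 1 := by
        simp [List.count_append, List.count_eq_zero.mpr hnx]
      unfold stepB
      rw [if_neg (by simp [hpx]), if_pos hpx]
      refine ⟨by rw [ih1, F_append_not_mem ys x hnx], by simp [hlast], ?_⟩
      simp only [hlast, Bool.false_eq_true, false_iff]
      rintro ⟨z, hz, h2⟩
      injection hz with hz
      subst hz
      omega

-- ===== VERDICT (by name: the statement is the Claim_ definition above) =====
theorem checkhas2_spec : Claim_equal_checkhas2 := by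
  intro path _
  unfold Spec_checkhas2 checkhas2 checkhas2_alt
  simp only
  rw [PySem.List.foldl_if_eq_foldl_filter]
  set xs := path.filter (fun a => !pyStrIsupper a) with hxs
  rw [dictA_eq_counter,
      PySem.Dict.values_eq_map_keys _ (PySem.Dict.nodup_keys_counter xs) 0,
      PySem.Dict.keys_counter,
      PySem.List.foldl_ite_add_one (fun dv => (2 : Int) ≤ dv)]
  simp only [List.countP_map, Function.comp_def, PySem.Dict.getD_counter]
  have hpred : (fun k => decide ((2 : Int) ≤ ((xs.count k : Nat) : Int)))
      = fun k => decide (2 ≤ xs.count k) := by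
    funext k
    rw [decide_eq_decide]
    omega
  rw [hpred, countP_ofList_eq_F]
  have hsb : (fun (st : Int × Option String × Bool) a =>
      if st.2.1 = some a ∧ st.2.2 = false then (st.1 + 1, st.2.1, true)
      else if st.2.1 ≠ some a then (st.1, some a, false)
      else st) = stepB := rfl
  rw [hsb]
  set ys := PySem.List.sorted xs (fun x => x) false with hys
  have hp : ys.Pairwise (· ≤ ·) := PySem.List.sorted_pairwise xs (fun x => x)
  obtain ⟨h1, -, -⟩ := foldB_inv ys hp
  rw [h1, F_perm (PySem.List.sorted_perm xs (fun x => x) false)]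
  simp
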